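-- pv_equiv track=rewrite | github.com/pypa/packaging | src/packaging/metadata.py | _parse_project_urls
-- ===== SOURCE A (Python) =====
-- from typing import Any, Callable, Dict, Generic, List, Optional, Tuple, Union, cast
--
-- def _parse_project_urls(data: List[str]) -> Dict[str, str]:
--     """Parse a list of label/URL string pairings separated by a comma."""
--     urls = {}
--     for pair in data:
--         # Our logic is slightly tricky here as we want to try and do
--         # *something* reasonable with malformed data.
--         #
--         # The main thing that we have to worry about, is data that does
--         # not have a ',' at all to split the label from the Value. There
--         # isn't a singular right answer here, and we will fail validation
--         # later on (if the caller is validating) so it doesn't *really*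
--         # matter, but since the missing value has to be an empty str
--         # and our return value is dict[str, str], if we let the key
--         # be the missing value, then they'd have multiple '' values that
--         # overwrite each other in a accumulating dict.
--         #
--         # The other potentional issue is that it's possible to have the
--         # same label multiple times in the metadata, with no solid "right"
--         # answer with what to do in that case. As such, we'll do the only
--         # thing we can, which is treat the field as unparseable and add it
--         # to our list of unparsed fields.
--         parts = [p.strip() for p in pair.split(",", 1)]
--         parts.extend([""] * (max(0, 2 - len(parts))))  # Ensure 2 items
--
--         # TODO: The spec doesn't say anything about if the keys should be
--         #       considered case sensitive or not... logically they should
--         #       be case-preserving and case-insensitive, but doing that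
--         #       would open up more cases where we might have duplicate
--         #       entries.
--         label, url = parts
--         if label in urls:
--             # The label already exists in our set of urls, so this field
--             # is unparseable, and we can just add the whole thing to our
--             # unparseable data and stop processing it.
--             raise KeyError("duplicate labels in project urls")
--         urls[label] = url
--
--     return urls
-- ===== SOURCE B (Python) =====
-- def _parse_pair(pair):
--     parts = [p.strip() for p in pair.split(",", 1)]
--     parts += [""] * (2 - len(parts))
--     return parts[0], parts[1]
--
-- def _parse_project_urls(data):
--     """Parse a list of label/URL string pairings separated by a comma."""
--     pairs = [_parse_pair(pair) for pair in data]
--     labels = [label for label, _ in pairs]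
--     if len(labels) != len(set(labels)):
--         raise KeyError("duplicate labels in project urls")
--     return dict(pairs)
-- ===== Notes on version B (the rewrite author's own statement) =====
-- stated objective: alternative
-- what changed: Replaces the fused loop (incremental dict insert with a per-step membership check and mid-loop raise) by two separate passes: a comprehension parsing every pair first, then one set-based duplicate check over all labels, then dict(pairs).
import Mathlib
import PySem

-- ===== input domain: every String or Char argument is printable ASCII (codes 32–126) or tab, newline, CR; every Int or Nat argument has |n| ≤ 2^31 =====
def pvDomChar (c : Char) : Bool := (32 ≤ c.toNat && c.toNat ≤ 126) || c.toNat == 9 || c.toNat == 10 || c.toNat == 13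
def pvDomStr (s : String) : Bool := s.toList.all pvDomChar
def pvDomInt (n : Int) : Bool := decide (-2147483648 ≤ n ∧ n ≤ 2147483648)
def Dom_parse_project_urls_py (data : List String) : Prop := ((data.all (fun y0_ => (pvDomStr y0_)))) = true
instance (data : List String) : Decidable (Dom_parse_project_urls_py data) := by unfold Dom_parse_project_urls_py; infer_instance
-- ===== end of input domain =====

-- B replaces A's fused loop (insert + per-step membership check + mid-loop raise) by two separate
-- passes: parse all pairs first, then one set-based duplicate check, then dict(pairs). Objective: alternative.

-- ===== PORT A =====
-- The loop of A; `none` is exactly the `raise KeyError` branch (excluded by Pre_).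
def pvA_go (data : List String) (urls : PySem.Dict String String) :
    Option (PySem.Dict String String) :=
  match data with
  | [] => some urls
  | pair :: rest =>
      let parts := ((PySem.Str.splitMax? pair "," 1).getD []).map (fun p => PySem.Str.strip p)
      -- parts.extend([""] * max(0, 2 - len(parts)))
      let parts := parts ++ List.replicate (max (0:Int) (2 - (parts.length : Int))).toNat ""
      -- `label, url = parts`: parts has exactly 2 elements here, so unpacking = indexing
      let label := parts.getD 0 ""
      let url := parts.getD 1 ""
      if urls.contains label then none
      else pvA_go rest (urls.insert label url)

def parse_project_urls_py (data : List String) : List (String × String) :=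
  ((pvA_go data PySem.Dict.empty).getD PySem.Dict.empty).items

-- ===== PORT B =====
def pvB_parsePair (pair : String) : String × String :=
  let parts := ((PySem.Str.splitMax? pair "," 1).getD []).map (fun p => PySem.Str.strip p)
  let parts := parts ++ List.replicate (2 - parts.length) ""
  (parts.getD 0 "", parts.getD 1 "")

def parse_project_urls_py_alt (data : List String) : List (String × String) :=
  let pairs := data.map pvB_parsePair
  let labels := pairs.map (fun p => p.1)
  -- `if len(labels) != len(set(labels)): raise KeyError(...)` — the raise is excluded by Pre_
  if labels.length ≠ (PySem.Set.ofList labels).length then []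
  else (PySem.Dict.ofList pairs).items

-- ===== PRECONDITION & SPEC =====
-- label of one input string, as both programs compute it (strip of the part before the first comma)
def pvLabel (pair : String) : String :=
  ((((PySem.Str.splitMax? pair "," 1).getD []).map (fun p => PySem.Str.strip p))
    ++ List.replicate 2 "").getD 0 ""

-- Pre_ excludes exactly the inputs with duplicate labels, on which A raises KeyError (and B raises the same KeyError).
def Pre_parse_project_urls_py (data : List String) : Prop := (data.map pvLabel).Nodup
instance (data : List String) : Decidable (Pre_parse_project_urls_py data) := by
  unfold Pre_parse_project_urls_py; infer_instance

def pvWitness_parse_project_urls_py : List String :=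
  ["Home, https://example.com/", "Docs,https://docs.example.com/", "no-comma-entry"]

def Spec_parse_project_urls_py (data : List String) (out : List (String × String)) : Prop := out = parse_project_urls_py_alt data
instance (data : List String) (out : List (String × String)) : Decidable (Spec_parse_project_urls_py data out) := by unfold Spec_parse_project_urls_py; infer_instance

-- ===== CLAIM (what is proved, stated in full; the proofs are below) =====
def Claim_equal_parse_project_urls_py : Prop := ∀ (data : List String), Dom_parse_project_urls_py data → Pre_parse_project_urls_py data → Spec_parse_project_urls_py data (parse_project_urls_py data)

-- ===== LEMMAS AND PROOFS =====

theorem pvPad_eq (n : Nat) : (max (0:Int) (2 - (n : Int))).toNat = 2 - n := by omega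

-- A's padded parts list equals B's padded parts list
theorem pvParts_eq (l : List String) :
    l ++ List.replicate (max (0:Int) (2 - (l.length : Int))).toNat "" =
    l ++ List.replicate (2 - l.length) "" := by rw [pvPad_eq]

theorem pvLabel_eq (pair : String) : (pvB_parsePair pair).1 = pvLabel pair := by
  unfold pvB_parsePair pvLabel
  cases ((PySem.Str.splitMax? pair "," 1).getD []).map (fun p => PySem.Str.strip p) with
  | nil => rfl
  | cons a l => rfl

theorem pvA_go_spec (data : List String) (d : PySem.Dict String String)
    (hnd : d.keys.Nodup)
    (hfresh : ∀ s ∈ data, d.contains (pvLabel s) = false)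
    (hnodup : (data.map pvLabel).Nodup) :
    ∃ D, pvA_go data d = some D ∧ D.items = d.items ++ data.map pvB_parsePair := by
  induction data generalizing d with
  | nil => exact ⟨d, rfl, by simp⟩
  | cons pair rest ih =>
      have hlab : (pvB_parsePair pair).1 = pvLabel pair := pvLabel_eq pair
      have hc : d.contains (pvLabel pair) = false := hfresh pair (by simp)
      -- identify A's label/url with B's pair
      have hgo : pvA_go (pair :: rest) d =
          pvA_go rest (d.insert (pvB_parsePair pair).1 (pvB_parsePair pair).2) := by
        simp only [pvA_go]
        rw [pvParts_eq]
        show (if d.contains (pvB_parsePair pair).1 = true then none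
              else pvA_go rest (d.insert (pvB_parsePair pair).1 (pvB_parsePair pair).2)) = _
        rw [hlab, hc]
        rfl
      have hnodup' : (rest.map pvLabel).Nodup := (List.nodup_cons.mp hnodup).2
      have hmem : pvLabel pair ∉ rest.map pvLabel := (List.nodup_cons.mp hnodup).1
      obtain ⟨D, hD, hitems⟩ := ih (d.insert (pvB_parsePair pair).1 (pvB_parsePair pair).2)
        (by rw [hlab]; exact PySem.Dict.nodup_keys_insert d _ _ hnd)
        (by
          intro s hs
          rw [hlab, PySem.Dict.contains_insert]
          have h1 : (pvLabel s == pvLabel pair) = false := by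
            simp only [beq_eq_false_iff_ne]
            intro h; exact hmem (h ▸ List.mem_map_of_mem hs)
          rw [h1, hfresh s (List.mem_cons_of_mem _ hs)]; rfl)
        hnodup'
      refine ⟨D, by rw [hgo, hD], ?_⟩
      rw [hitems, PySem.Dict.items_insert_of_not_contains _ _ (by rw [hlab]; exact hc)]
      simp

theorem pvOfList_items (pairs : List (String × String))
    (h : (pairs.map (fun p => p.1)).Nodup) :
    (PySem.Dict.ofList pairs).items = pairs := by
  unfold PySem.Dict.ofList PySem.Dict.update
  have := PySem.Dict.items_foldl_insert_fresh (l := pairs) (k := fun p => p.1)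
    (v := fun p => p.2) (d := PySem.Dict.empty)
    (by intro a _; exact PySem.Dict.contains_empty _) h
  simpa using this

-- ===== VERDICT (by name: the statement is the Claim_ definition above) =====
theorem parse_project_urls_py_spec : Claim_equal_parse_project_urls_py := by
  intro data _ hpre
  unfold Spec_parse_project_urls_py parse_project_urls_py parse_project_urls_py_alt
  have hlab : (data.map pvB_parsePair).map (fun p => p.1) = data.map pvLabel := by
    rw [List.map_map]; exact List.map_congr_left (fun s _ => pvLabel_eq s)
  have hnodup : ((data.map pvB_parsePair).map (fun p => p.1)).Nodup := by rw [hlab]; exact hpre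
  obtain ⟨D, hD, hitems⟩ := pvA_go_spec data PySem.Dict.empty (by simp)
    (fun s _ => PySem.Dict.contains_empty _) hpre
  rw [hD]
  simp only [Option.getD_some]
  rw [hitems]
  rw [PySem.Set.ofList_eq_self_of_nodup _ (hlab ▸ hpre)]
  simp [pvOfList_items _ hnodup, PySem.Dict.empty]
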